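-- pv_equiv track=rewrite | github.com/OriolGraCar/IndeLLM | indellm/scorer.py | truncate_sequences
-- ===== SOURCE A (Python) =====
-- def truncate_sequences(wtseq, mutseq):
--
--     min_length = min(len(wtseq), len(mutseq))
--
--     for i in range(min_length):
--         if wtseq[i] != mutseq[i]:
--             start_position = i # index of the first difference
--
--     # Compute length
--     wt_len = len(wtseq)
--     mut_len = len(mutseq)
--     start_i = 0
--     end_i_wt = wt_len
--     end_i_mut = mut_len
--     diff = abs(wt_len - mut_len)
--     allowance = 500
--     if diff > 22: # ESM1 allowance
--         extra = diff - 22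
--         extra = int(extra/2) + 1
--         allowance = allowance - extra
--     # recalculate index to have it centered at 500 each side
--     if start_position > allowance:
--         start_i = start_position - allowance
--     if wt_len > mut_len:
--         end_i_wt = start_position + allowance + diff
--         end_i_mut = start_position + allowance
--     else:
--         end_i_wt = start_position + allowance
--         end_i_mut = start_position + allowance + diff
--     wtseq = wtseq[start_i:end_i_wt]
--     mutseq = mutseq[start_i:end_i_mut]
--
--     return wtseq, mutseq
-- ===== SOURCE B (Python) =====
-- def truncate_sequences(wtseq, mutseq):
--     # reverse scan with early exit: the first hit from the right IS the last
--     # differing index in the common prefix region (what A's overwriting loop keeps).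
--     for i in range(min(len(wtseq), len(mutseq)) - 1, -1, -1):
--         if wtseq[i] != mutseq[i]:
--             start_position = i
--             break
--
--     wt_len = len(wtseq)
--     mut_len = len(mutseq)
--     diff = abs(wt_len - mut_len)
--     allowance = 500
--     if diff > 22:  # ESM1 allowance
--         allowance -= (diff - 22) // 2 + 1
--     start_i = max(0, start_position - allowance)
--     if wt_len > mut_len:
--         end_i_wt = start_position + allowance + diff
--         end_i_mut = start_position + allowance
--     else:
--         end_i_wt = start_position + allowance
--         end_i_mut = start_position + allowance + diff
--     return wtseq[start_i:end_i_wt], mutseq[start_i:end_i_mut]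
-- ===== Notes on version B (the rewrite author's own statement) =====
-- stated objective: faster
-- what changed: The forward loop that overwrites start_position at every mismatch is replaced by a reverse scan that breaks at the first (i.e. last) mismatching index, and the start_i guard becomes max(0, start_position - allowance); both raise on sequences with no mismatch in the common prefix region, which Pre_ excludes.
import Mathlib
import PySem

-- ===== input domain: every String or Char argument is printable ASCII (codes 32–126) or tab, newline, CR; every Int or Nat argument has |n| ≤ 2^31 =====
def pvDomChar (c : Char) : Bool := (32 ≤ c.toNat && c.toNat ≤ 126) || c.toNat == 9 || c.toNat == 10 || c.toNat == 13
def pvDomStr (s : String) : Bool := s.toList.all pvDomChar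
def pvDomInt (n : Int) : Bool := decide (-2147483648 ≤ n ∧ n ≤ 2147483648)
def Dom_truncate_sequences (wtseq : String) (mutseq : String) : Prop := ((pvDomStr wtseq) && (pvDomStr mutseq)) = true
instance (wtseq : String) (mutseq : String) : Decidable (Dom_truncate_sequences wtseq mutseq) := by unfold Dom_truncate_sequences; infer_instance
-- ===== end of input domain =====

-- B replaces A's overwriting forward scan by a reverse scan with early exit (same result: the
-- last mismatching index); equality proved on Pre_ (some mismatch exists; otherwise both Pythons raise).

-- ===== PORT A =====
def truncate_sequences (wtseq : String) (mutseq : String) : String × String :=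
  let wt := wtseq.toList
  let mu := mutseq.toList
  let min_length : Int := min (wt.length : Int) (mu.length : Int)
  -- for i in range(min_length): if wtseq[i] != mutseq[i]: start_position = i
  let sp? : Option Int :=
    (PySem.List.pyRange 0 min_length 1).foldl
      (fun acc i => if PySem.List.pyGet? wt i ≠ PySem.List.pyGet? mu i then some i else acc) none
  -- start_position is unbound (UnboundLocalError) when sp? = none; Pre_ excludes those inputs
  let start_position : Int := sp?.getD 0
  let wt_len : Int := wt.length
  let mut_len : Int := mu.length
  let start_i : Int := 0
  let diff : Int := |wt_len - mut_len|
  let allowance : Int := 500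
  let allowance : Int :=
    if diff > 22 then
      let extra := diff - 22
      -- int(extra/2): extra > 0 here, so float truncation coincides with floor division
      let extra := PySem.Int.floordiv extra 2 + 1
      allowance - extra
    else allowance
  let start_i : Int := if start_position > allowance then start_position - allowance else start_i
  let p : Int × Int :=
    if wt_len > mut_len then (start_position + allowance + diff, start_position + allowance)
    else (start_position + allowance, start_position + allowance + diff)
  (String.ofList (PySem.List.slice wt (some start_i) (some p.1)),
   String.ofList (PySem.List.slice mu (some start_i) (some p.2)))

-- ===== PORT B =====
-- for i in range(m-1, -1, -1): if wtseq[i] != mutseq[i]: start_position = i; break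
def revFindDiff (wt mu : List Char) : Nat → Option Int
  | 0 => none
  | k + 1 =>
    if PySem.List.pyGet? wt (k : Int) ≠ PySem.List.pyGet? mu (k : Int) then some (k : Int)
    else revFindDiff wt mu k

def truncate_sequences_alt (wtseq : String) (mutseq : String) : String × String :=
  let wt := wtseq.toList
  let mu := mutseq.toList
  -- start_position unbound (UnboundLocalError) when the scan finds nothing; Pre_ excludes those inputs
  let start_position : Int := (revFindDiff wt mu (min wt.length mu.length)).getD 0
  let wt_len : Int := wt.length
  let mut_len : Int := mu.length
  let diff : Int := |wt_len - mut_len|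
  let allowance : Int := if diff > 22 then 500 - (PySem.Int.floordiv (diff - 22) 2 + 1) else 500
  let start_i : Int := max 0 (start_position - allowance)
  let p : Int × Int :=
    if wt_len > mut_len then (start_position + allowance + diff, start_position + allowance)
    else (start_position + allowance, start_position + allowance + diff)
  (String.ofList (PySem.List.slice wt (some start_i) (some p.1)),
   String.ofList (PySem.List.slice mu (some start_i) (some p.2)))

-- ===== PRECONDITION & SPEC =====
-- Pre_ excludes exactly the inputs whose common prefix region has no mismatch (equal strings, or
-- one a prefix of the other): there A's start_position is never assigned and A raises
-- UnboundLocalError (B's loop never breaks and raises identically).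
def Pre_truncate_sequences (wtseq : String) (mutseq : String) : Prop :=
  (wtseq.toList.zip mutseq.toList).any (fun p => p.1 != p.2) = true
instance (wtseq : String) (mutseq : String) : Decidable (Pre_truncate_sequences wtseq mutseq) := by
  unfold Pre_truncate_sequences; infer_instance

def pvWitness_truncate_sequences : String × String := ("abXde", "abYde")

def Spec_truncate_sequences (wtseq : String) (mutseq : String) (out : String × String) : Prop :=
  out = truncate_sequences_alt wtseq mutseq
instance (wtseq : String) (mutseq : String) (out : String × String) :
    Decidable (Spec_truncate_sequences wtseq mutseq out) := by
  unfold Spec_truncate_sequences; infer_instance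

-- ===== CLAIM (what is proved, stated in full; the proofs are below) =====
def Claim_equal_truncate_sequences : Prop := ∀ (wtseq : String) (mutseq : String), Dom_truncate_sequences wtseq mutseq → Pre_truncate_sequences wtseq mutseq → Spec_truncate_sequences wtseq mutseq (truncate_sequences wtseq mutseq)

-- ===== LEMMAS AND PROOFS =====

-- A's forward overwriting fold over range(m) computes the same thing as B's reverse early-exit scan:
-- the last index below m where the sequences differ (none if there is none).
theorem fold_eq_revFind (wt mu : List Char) (m : Nat) :
    (PySem.List.pyRange 0 (m : Int) 1).foldl
      (fun acc i => if PySem.List.pyGet? wt i ≠ PySem.List.pyGet? mu i then some i else acc)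
      (none : Option Int)
    = revFindDiff wt mu m := by
  induction m with
  | zero => simp [revFindDiff, PySem.List.pyRange_one_eq_nil]
  | succ k ih =>
    have h : ((k : Int) + 1) = ((k + 1 : Nat) : Int) := by push_cast; ring
    rw [revFindDiff, ← ih, ← h, PySem.List.pyRange_one_succ_right (by positivity),
        List.foldl_append]
    simp only [List.foldl]

theorem truncate_sequences_spec : Claim_equal_truncate_sequences := by
  intro wtseq mutseq _ _
  unfold Spec_truncate_sequences truncate_sequences truncate_sequences_alt
  have hgen : ∀ a b : Int, (if a > b then a - b else 0) = max 0 (a - b) := by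
    intro a b; split <;> omega
  simp only [← Nat.cast_min, fold_eq_revFind, hgen]
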